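-- pv_equiv track=rewrite | github.com/BoudewijnKlijn/competitive_programming | leetcode/leetcode_1937.py | faster2
-- ===== SOURCE A (Python) =====
-- from typing import List
--
-- def faster2(points: List[List[int]]) -> int:
--     """Time limit exceeded.
--     141/157 passed."""
--     best = points[0]
--     for row_next in points[1:]:
--         best = [
--             extra_points
--             + max(
--                 current_points - abs(col_next - col_current)
--                 for col_current, current_points in enumerate(best)
--             )
--             for col_next, extra_points in enumerate(row_next)
--         ]
--     return max(best)
-- ===== SOURCE B (Python) =====
-- def faster2(points):
--     best = points[0]
--     for row in points[1:]:
--         m = len(best)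
--         # pref[i] = max over k <= i of best[k] + k
--         pref = []
--         cur = best[0]
--         for i, v in enumerate(best):
--             cur = max(cur, v + i)
--             pref.append(cur)
--         # suf[i] = max over k >= i of best[k] - k
--         cur = best[-1] - (m - 1)
--         suf_rev = []
--         for i, v in reversed(list(enumerate(best))):
--             cur = max(cur, v - i)
--             suf_rev.append(cur)
--         suf = suf_rev[::-1]
--         best = [
--             x + (max(pref[j] - j, suf[j] + j) if j < m else pref[-1] - j)
--             for j, x in enumerate(row)
--         ]
--     return max(best)
-- ===== Notes on version B (the rewrite author's own statement) =====
-- stated objective: faster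
-- what changed: Replaces the inner scan over all previous columns (max over i of best[i]-|j-i| recomputed for every j) by two directional running-max prefix/suffix passes per row, splitting |j-i| into j-i and i-j, so each row costs O(m) instead of O(m^2).
import Mathlib
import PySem

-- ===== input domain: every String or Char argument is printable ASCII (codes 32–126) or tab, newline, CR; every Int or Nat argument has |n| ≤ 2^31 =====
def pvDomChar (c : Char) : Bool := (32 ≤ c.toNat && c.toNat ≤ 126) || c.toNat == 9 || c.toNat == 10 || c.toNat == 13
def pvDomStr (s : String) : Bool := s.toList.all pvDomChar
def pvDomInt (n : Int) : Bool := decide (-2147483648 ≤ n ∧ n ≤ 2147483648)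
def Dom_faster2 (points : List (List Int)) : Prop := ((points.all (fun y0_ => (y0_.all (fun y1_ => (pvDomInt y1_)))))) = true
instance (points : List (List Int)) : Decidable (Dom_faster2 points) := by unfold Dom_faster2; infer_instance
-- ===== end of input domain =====

-- B replaces A's per-column scan over all previous columns by two directional
-- running-max passes per row (splitting |j-i| into j-i and i-j); objective: faster.


-- ===== PORT A =====
-- Python max(xs) on a nonempty list is the running-max loop (PySem.List.max?_id_cons);
-- the empty case (Python: ValueError) is excluded by Pre_faster2, the 0 there is junk.
def pyMax (l : List Int) : Int :=
  match l with
  | [] => 0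
  | h :: t => t.foldl max h

def stepA (best row_next : List Int) : List Int :=
  (PySem.List.enumerate row_next).map (fun cn =>
    cn.2 + pyMax ((PySem.List.enumerate best).map (fun cc => cc.2 - |cn.1 - cc.1|)))

def faster2 (points : List (List Int)) : Int :=
  match points with
  | [] => 0          -- Python: points[0] raises IndexError; excluded by Pre_faster2
  | b :: rest => pyMax (rest.foldl stepA b)

-- ===== PORT B =====
-- 'cur = max(cur, v + i); pref.append(cur)' over enumerate(best): structural scan
def prefScan (l : List Int) (i cur : Int) : List Int :=
  match l with
  | [] => []
  | v :: t => max cur (v + i) :: prefScan t (i + 1) (max cur (v + i))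

-- the same loop over reversed(list(enumerate(best))): scan over best.reverse, index counting down
def sufScanRev (l : List Int) (i cur : Int) : List Int :=
  match l with
  | [] => []
  | v :: t => max cur (v - i) :: sufScanRev t (i - 1) (max cur (v - i))

def stepB (best row : List Int) : List Int :=
  let m : Int := best.length
  let pref := prefScan best 0 ((PySem.List.pyGet? best 0).getD 0)
  let sufRev := sufScanRev best.reverse (m - 1) ((PySem.List.pyGet? best (-1)).getD 0 - (m - 1))
  let suf := sufRev.reverse
  (PySem.List.enumerate row).map (fun jx =>
    jx.2 + (if jx.1 < m then
              max ((PySem.List.pyGet? pref jx.1).getD 0 - jx.1)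
                  ((PySem.List.pyGet? suf jx.1).getD 0 + jx.1)
            else (PySem.List.pyGet? pref (-1)).getD 0 - jx.1))

def faster2_alt (points : List (List Int)) : Int :=
  match points with
  | [] => 0          -- Python: points[0] raises IndexError; excluded by Pre_faster2
  | b :: rest =>
    match rest.foldl stepB b with
    | [] => 0
    | h :: t => t.foldl max h

-- ===== PRECONDITION & SPEC =====
-- Pre_ excludes exactly the inputs on which the Python A raises: an empty points list
-- (IndexError on points[0]) or an empty row (ValueError from max() over an empty sequence).
def Pre_faster2 (points : List (List Int)) : Prop :=
  points ≠ [] ∧ ∀ r ∈ points, r ≠ []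
instance (points : List (List Int)) : Decidable (Pre_faster2 points) := by unfold Pre_faster2; infer_instance

def pvWitness_faster2 : List (List Int) := [[1, 2, 3], [4, 0, 1]]

def Spec_faster2 (points : List (List Int)) (out : Int) : Prop := out = faster2_alt points
instance (points : List (List Int)) (out : Int) : Decidable (Spec_faster2 points out) := by unfold Spec_faster2; infer_instance

-- ===== CLAIM (what is proved, stated in full; the proofs are below) =====
def Claim_equal_faster2 : Prop := ∀ (points : List (List Int)), Dom_faster2 points → Pre_faster2 points → Spec_faster2 points (faster2 points)

-- ===== LEMMAS AND PROOFS =====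

theorem pyMax_spec (l : List Int) (hl : l ≠ []) : pyMax l ∈ l ∧ ∀ x ∈ l, x ≤ pyMax l := by
  match l with
  | h :: t =>
    have hm : PySem.List.max? (h :: t) (fun y => y) = some (pyMax (h :: t)) :=
      PySem.List.max?_id_cons h t
    exact ⟨PySem.List.max?_mem hm, fun x hx => PySem.List.max?_isMax hm x hx⟩

theorem length_prefScan (l : List Int) (i cur : Int) : (prefScan l i cur).length = l.length := by
  induction l generalizing i cur with
  | nil => rfl
  | cons v t ih => simp [prefScan, ih]

theorem sufScanRev_eq_prefScan (l : List Int) (i cur : Int) :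
    sufScanRev l i cur = prefScan l (-i) cur := by
  induction l generalizing i cur with
  | nil => rfl
  | cons v t ih =>
    simp only [sufScanRev, prefScan, sub_eq_add_neg]
    rw [ih]
    ring_nf

-- invariant of the running-max scan: entry k bounds cur and every l[t] + (i + t), t ≤ k,
-- and is one of those values
theorem prefScan_spec (l : List Int) (i cur : Int) (k : Nat) (hk : k < l.length) :
    cur ≤ (prefScan l i cur).getD k 0 ∧
    (∀ t : Nat, t ≤ k → l.getD t 0 + (i + t) ≤ (prefScan l i cur).getD k 0) ∧
    ((prefScan l i cur).getD k 0 = cur ∨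
      ∃ t : Nat, t ≤ k ∧ (prefScan l i cur).getD k 0 = l.getD t 0 + (i + t)) := by
  induction l generalizing i cur k with
  | nil => simp at hk
  | cons v tl ih =>
    cases k with
    | zero =>
      simp only [prefScan, List.getD_cons_zero]
      refine ⟨le_max_left _ _, ?_, ?_⟩
      · intro t ht
        interval_cases t
        simp
      · rcases le_total cur (v + i) with h | h
        · right; exact ⟨0, le_refl _, by simp [max_eq_right h]⟩
        · left; simp [max_eq_left h]
    | succ k =>
      simp only [prefScan, List.getD_cons_succ, List.length_cons] at hk ⊢
      have hk' : k < tl.length := by omega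
      obtain ⟨h1, h2, h3⟩ := ih (i + 1) (max cur (v + i)) k hk'
      refine ⟨le_trans (le_max_left _ _) h1, ?_, ?_⟩
      · intro t ht
        cases t with
        | zero =>
          simp only [List.getD_cons_zero, Nat.cast_zero, add_zero]
          exact le_trans (le_max_right _ _) h1
        | succ s =>
          have := h2 s (by omega)
          simp only [List.getD_cons_succ]
          push_cast at this ⊢
          linarith
      · rcases h3 with h | ⟨s, hs, he⟩
        · rcases le_total cur (v + i) with hc | hc
          · right
            refine ⟨0, by omega, ?_⟩
            rw [h, max_eq_right hc]
            simp
          · left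
            rw [h, max_eq_left hc]
        · right
          refine ⟨s + 1, by omega, ?_⟩
          simp only [List.getD_cons_succ]
          push_cast
          linarith

-- pref[k] is exactly the max over t ≤ k of best[t] + t
theorem pref_char (best : List Int) (k : Nat) (hk : k < best.length) :
    (∀ t : Nat, t ≤ k → best.getD t 0 + t ≤ (prefScan best 0 (best.getD 0 0)).getD k 0) ∧
    (∃ t : Nat, t ≤ k ∧ (prefScan best 0 (best.getD 0 0)).getD k 0 = best.getD t 0 + t) := by
  obtain ⟨h1, h2, h3⟩ := prefScan_spec best 0 (best.getD 0 0) k hk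
  refine ⟨fun t ht => by simpa using h2 t ht, ?_⟩
  rcases h3 with h | ⟨t, ht, he⟩
  · exact ⟨0, Nat.zero_le _, by simpa using h⟩
  · exact ⟨t, ht, by simpa using he⟩

theorem getD_reverse (l : List Int) (t : Nat) (ht : t < l.length) :
    l.reverse.getD t 0 = l.getD (l.length - 1 - t) 0 := by
  rw [List.getD_eq_getElem?_getD, List.getD_eq_getElem?_getD,
    List.getElem?_reverse (by simpa using ht)]

-- suf[k] is exactly the max over q ≥ k of best[q] - q
theorem suf_char (best : List Int) (k : Nat) (hk : k < best.length) :
    (∀ q : Nat, k ≤ q → q < best.length →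
        best.getD q 0 - q ≤
        ((sufScanRev best.reverse ((best.length : Int) - 1)
            (best.getD (best.length - 1) 0 - ((best.length : Int) - 1))).reverse).getD k 0) ∧
    (∃ q : Nat, k ≤ q ∧ q < best.length ∧
        ((sufScanRev best.reverse ((best.length : Int) - 1)
            (best.getD (best.length - 1) 0 - ((best.length : Int) - 1))).reverse).getD k 0
          = best.getD q 0 - q) := by
  rw [sufScanRev_eq_prefScan]
  have hm : 0 < best.length := by omega
  set P := prefScan best.reverse (-((best.length : Int) - 1))
      (best.getD (best.length - 1) 0 - ((best.length : Int) - 1)) with hP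
  have hlen : P.length = best.length := by
    rw [hP, length_prefScan, List.length_reverse]
  have hrewr : (P.reverse).getD k 0 = P.getD (best.length - 1 - k) 0 := by
    rw [List.getD_eq_getElem?_getD, List.getD_eq_getElem?_getD,
      List.getElem?_reverse (by omega), hlen]
  rw [hrewr]
  obtain ⟨h1, h2, h3⟩ := prefScan_spec best.reverse (-((best.length : Int) - 1))
    (best.getD (best.length - 1) 0 - ((best.length : Int) - 1)) (best.length - 1 - k)
    (by rw [List.length_reverse]; omega)
  constructor
  · intro q hkq hq
    have := h2 (best.length - 1 - q) (by omega)
    rw [getD_reverse _ _ (by omega)] at this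
    have hq' : best.length - 1 - (best.length - 1 - q) = q := by omega
    rw [hq'] at this
    have hcast : (-((best.length : Int) - 1) + ((best.length - 1 - q : Nat) : Int)) = -(q : Int) := by
      push_cast [Nat.cast_sub (by omega : q ≤ best.length - 1), Nat.cast_sub (by omega : 1 ≤ best.length)]
      ring
    rw [hcast] at this
    linarith
  · rcases h3 with h | ⟨t, ht, he⟩
    · refine ⟨best.length - 1, by omega, by omega, ?_⟩
      rw [h]
      have : ((best.length : Int) - 1) = ((best.length - 1 : Nat) : Int) := by
        push_cast [Nat.cast_sub (by omega : 1 ≤ best.length)]; ring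
      rw [this]
    · refine ⟨best.length - 1 - t, by omega, by omega, ?_⟩
      rw [he, getD_reverse _ _ (by omega)]
      have hcast : (-((best.length : Int) - 1) + (t : Int)) = -(((best.length - 1 - t : Nat) : Int)) := by
        have ht' : t ≤ best.length - 1 := by omega
        push_cast [Nat.cast_sub ht', Nat.cast_sub (by omega : 1 ≤ best.length)]
        ring
      rw [hcast]
      ring

-- B's per-column candidate equals A's scan max over all previous columns
theorem cand_eq (best : List Int) (hb : best ≠ []) (k : Nat) :
    (if (k : Int) < (best.length : Int) then
        max ((PySem.List.pyGet? (prefScan best 0 ((PySem.List.pyGet? best 0).getD 0)) (k : Int)).getD 0 - (k : Int))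
            ((PySem.List.pyGet? ((sufScanRev best.reverse ((best.length : Int) - 1)
                ((PySem.List.pyGet? best (-1)).getD 0 - ((best.length : Int) - 1))).reverse) (k : Int)).getD 0 + (k : Int))
     else (PySem.List.pyGet? (prefScan best 0 ((PySem.List.pyGet? best 0).getD 0)) (-1)).getD 0 - (k : Int))
    = pyMax ((PySem.List.enumerate best).map (fun cc => cc.2 - |(k : Int) - cc.1|)) := by
  have hm : 0 < best.length := List.length_pos_iff.mpr hb
  have hcur0 : (PySem.List.pyGet? best 0).getD 0 = best.getD 0 0 := by
    rw [PySem.List.pyGet?_zero, List.getD_eq_getElem?_getD]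
  have hlast : (PySem.List.pyGet? best (-1)).getD 0 = best.getD (best.length - 1) 0 := by
    rw [PySem.List.pyGet?_neg_one, List.getLast?_eq_getElem?, List.getD_eq_getElem?_getD]
  rw [hcur0, hlast]
  set P := prefScan best 0 (best.getD 0 0) with hPdef
  set S := (sufScanRev best.reverse ((best.length : Int) - 1)
      (best.getD (best.length - 1) 0 - ((best.length : Int) - 1))).reverse with hSdef
  set L := (PySem.List.enumerate best).map (fun cc => cc.2 - |(k : Int) - cc.1|) with hLdef
  have hLlen : L.length = best.length := by
    rw [hLdef]; simp [PySem.List.length_enumerate]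
  have hLne : L ≠ [] := by
    intro h
    rw [h] at hLlen
    simp at hLlen
    omega
  obtain ⟨hmem, hub⟩ := pyMax_spec L hLne
  have hmemL : ∀ x : Int, x ∈ L ↔
      ∃ i : Nat, i < best.length ∧ x = best.getD i 0 - |(k : Int) - (i : Int)| := by
    intro x
    rw [hLdef]
    simp only [List.mem_map, PySem.List.mem_enumerate_iff]
    constructor
    · rintro ⟨p, ⟨i, hi, rfl⟩, rfl⟩
      refine ⟨i, hi, ?_⟩
      simp [List.getD_eq_getElem?_getD, List.getElem?_eq_getElem hi]
    · rintro ⟨i, hi, rfl⟩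
      refine ⟨((i : Int), best[i]), ⟨i, hi, by simp⟩, ?_⟩
      simp [List.getD_eq_getElem?_getD, List.getElem?_eq_getElem hi]
  by_cases hk : (k : Int) < (best.length : Int)
  · have hkN : k < best.length := by exact_mod_cast hk
    rw [if_pos hk]
    have hPk : (PySem.List.pyGet? P (k : Int)).getD 0 = P.getD k 0 := by
      rw [PySem.List.pyGet?_natCast, List.getD_eq_getElem?_getD]
    have hSk : (PySem.List.pyGet? S (k : Int)).getD 0 = S.getD k 0 := by
      rw [PySem.List.pyGet?_natCast, List.getD_eq_getElem?_getD]
    rw [hPk, hSk]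
    obtain ⟨hPub, t, htk, hPt⟩ := pref_char best k hkN
    obtain ⟨hSub, q, hkq, hq, hSq⟩ := suf_char best k hkN
    apply le_antisymm
    · -- B's candidate is an element of L
      apply hub
      rcases le_total (P.getD k 0 - (k : Int)) (S.getD k 0 + (k : Int)) with h | h
      · rw [max_eq_right h]
        rw [hmemL]
        refine ⟨q, hq, ?_⟩
        have habs : |(k : Int) - (q : Int)| = (q : Int) - (k : Int) := by
          rw [abs_sub_comm]; exact abs_of_nonneg (by omega)
        rw [habs, hSq]
        ring
      · rw [max_eq_left h]
        rw [hmemL]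
        refine ⟨t, by omega, ?_⟩
        have habs : |(k : Int) - (t : Int)| = (k : Int) - (t : Int) := abs_of_nonneg (by omega)
        rw [habs, hPt]
        ring
    · -- B's candidate is an upper bound of L, and pyMax L ∈ L
      obtain ⟨i, hi, he⟩ := (hmemL _).mp hmem
      rw [he]
      rcases le_or_gt i k with hik | hik
      · have habs : |(k : Int) - (i : Int)| = (k : Int) - (i : Int) := abs_of_nonneg (by omega)
        have := hPub i hik
        rw [habs]
        have h1 : best.getD i 0 - ((k : Int) - i) ≤ P.getD k 0 - k := by linarith
        exact le_trans h1 (le_max_left _ _)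
      · have habs : |(k : Int) - (i : Int)| = (i : Int) - (k : Int) := by
          rw [abs_sub_comm]; exact abs_of_nonneg (by omega)
        have := hSub i (by omega) hi
        rw [habs]
        have h1 : best.getD i 0 - ((i : Int) - k) ≤ S.getD k 0 + k := by linarith
        exact le_trans h1 (le_max_right _ _)
  · have hkN : best.length ≤ k := by omega
    rw [if_neg hk]
    have hPlen : P.length = best.length := by rw [hPdef, length_prefScan]
    have hPlast : (PySem.List.pyGet? P (-1)).getD 0 = P.getD (best.length - 1) 0 := by
      rw [PySem.List.pyGet?_neg_one, List.getLast?_eq_getElem?, hPlen, List.getD_eq_getElem?_getD]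
    rw [hPlast]
    obtain ⟨hPub, t, htk, hPt⟩ := pref_char best (best.length - 1) (by omega)
    apply le_antisymm
    · apply hub
      rw [hmemL]
      refine ⟨t, by omega, ?_⟩
      have habs : |(k : Int) - (t : Int)| = (k : Int) - (t : Int) := abs_of_nonneg (by omega)
      rw [habs, hPt]
      ring
    · obtain ⟨i, hi, he⟩ := (hmemL _).mp hmem
      rw [he]
      have habs : |(k : Int) - (i : Int)| = (k : Int) - (i : Int) := abs_of_nonneg (by omega)
      have := hPub i (by omega)
      rw [habs]
      linarith

theorem stepA_eq_stepB (best row : List Int) (hb : best ≠ []) :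
    stepA best row = stepB best row := by
  unfold stepA stepB
  apply List.map_congr_left
  intro p hp
  obtain ⟨k, hk, rfl⟩ := (PySem.List.mem_enumerate_iff _ _ _).mp hp
  simp only [zero_add]
  congr 1
  exact (cand_eq best hb k).symm

theorem length_stepA (best row : List Int) : (stepA best row).length = row.length := by
  simp [stepA, PySem.List.length_enumerate]

theorem foldl_stepA_eq (rest : List (List Int)) (b : List Int) (hb : b ≠ [])
    (hr : ∀ r ∈ rest, r ≠ []) :
    rest.foldl stepA b = rest.foldl stepB b := by
  induction rest generalizing b with
  | nil => rfl
  | cons r rs ih =>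
    have hr0 : r ≠ [] := hr r (List.mem_cons_self ..)
    have hb' : stepA b r ≠ [] := by
      intro h
      have := length_stepA b r
      rw [h] at this
      exact hr0 (List.eq_nil_of_length_eq_zero this.symm)
    simp only [List.foldl_cons]
    rw [← stepA_eq_stepB b r hb]
    exact ih (stepA b r) hb' (fun x hx => hr x (List.mem_cons_of_mem _ hx))

-- ===== VERDICT (by name: the statement is the Claim_ definition above) =====
theorem faster2_spec : Claim_equal_faster2 := by
  intro points _ hpre
  unfold Spec_faster2
  obtain ⟨hne, hrows⟩ := hpre
  match points with
  | [] => exact absurd rfl hne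
  | b :: rest =>
    have hb : b ≠ [] := hrows b (List.mem_cons_self ..)
    have hfold := foldl_stepA_eq rest b hb (fun r hr => hrows r (List.mem_cons_of_mem _ hr))
    show pyMax (rest.foldl stepA b) = _
    rw [hfold]
    show pyMax (rest.foldl stepB b) = faster2_alt (b :: rest)
    unfold faster2_alt
    rcases hres : rest.foldl stepB b with _ | ⟨h, t⟩ <;> simp [pyMax, hres]
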